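-- pv_equiv track=rewrite | github.com/siwonpada/beak | 1564/py.py | reduce0
-- ===== SOURCE A (Python) =====
-- def reduce0(N : int) -> int:
--   s_res = str(N)
--   while len(s_res) > 1:
--     if s_res[-1] == '0':
--       s_res = s_res[:-1]
--     else:
--       break
--   return int(s_res)
-- ===== SOURCE B (Python) =====
-- def reduce0(N : int) -> int:
--   while N != 0 and N % 10 == 0:
--     N //= 10
--   return N
-- ===== Notes on version B (the rewrite author's own statement) =====
-- stated objective: simpler
-- what changed: Replaces A's string pipeline (str(N), a loop slicing off one trailing '0' character at a time, int(...) reparse) by pure integer arithmetic: floor-divide N by ten while it is nonzero and divisible by ten; no string is ever built.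
import Mathlib
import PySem

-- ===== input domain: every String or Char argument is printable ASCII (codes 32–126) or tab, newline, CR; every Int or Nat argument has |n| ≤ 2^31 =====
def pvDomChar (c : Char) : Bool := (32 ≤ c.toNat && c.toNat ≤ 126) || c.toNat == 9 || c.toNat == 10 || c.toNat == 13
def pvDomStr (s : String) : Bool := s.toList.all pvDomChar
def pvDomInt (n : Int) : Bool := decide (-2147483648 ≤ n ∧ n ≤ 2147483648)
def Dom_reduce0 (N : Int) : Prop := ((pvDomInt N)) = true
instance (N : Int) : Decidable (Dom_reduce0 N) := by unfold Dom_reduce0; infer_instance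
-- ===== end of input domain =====

-- B drops the string pipeline entirely: it peels trailing decimal zeros by integer
-- arithmetic (divisibility by 10 and floor division) instead of str/slice/int (objective: simpler).

-- ===== PORT A =====
-- the while loop of A: peel the last character while len > 1 and it is '0'
def reduce0Loop (s : List Char) : List Char :=
  if 1 < s.length then
    if PySem.List.pyGet? s (-1) = some '0' then
      reduce0Loop (PySem.List.slice s none (some (-1)))
    else s
  else s
termination_by s.length
decreasing_by
  simp only [PySem.List.slice_to_neg_one, List.length_dropLast]
  omega

-- hand port of int(s_res), exact on the strings this program reaches (str(N) with trailing
-- zeros removed: an optional leading '-', then decimal digits — no spaces, no '+', no '_')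
def decVal (ds : List Char) : Int := ds.foldl (fun a c => 10 * a + ((c.toNat : Int) - 48)) 0
def pyIntCanon (s : List Char) : Int :=
  if s.head? = some '-' then -(decVal s.tail) else decVal s

def reduce0 (N : Int) : Int := pyIntCanon (reduce0Loop (PySem.Int.toChars N))

-- ===== PORT B =====
def reduce0_alt (N : Int) : Int :=
  if h : N ≠ 0 ∧ PySem.Int.mod N 10 = 0 then reduce0_alt (PySem.Int.floordiv N 10) else N
termination_by N.natAbs
decreasing_by
  have hm : N.fmod 10 = 0 := h.2
  have h0 : N ≠ 0 := h.1
  rw [show N.fmod 10 = N % 10 from by simp [Int.fmod_eq_emod]] at hm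
  simp only [PySem.Int.floordiv, show N.fdiv 10 = N / 10 from by simp [Int.fdiv_eq_ediv]]
  omega

-- ===== PRECONDITION & SPEC =====
def Spec_reduce0 (N : Int) (out : Int) : Prop := out = reduce0_alt N
instance (N : Int) (out : Int) : Decidable (Spec_reduce0 N out) := by unfold Spec_reduce0; infer_instance

-- ===== CLAIM (what is proved, stated in full; the proofs are below) =====
def Claim_equal_reduce0 : Prop := ∀ (N : Int), Dom_reduce0 N → Spec_reduce0 N (reduce0 N)

-- ===== LEMMAS AND PROOFS =====

-- structural characterisation of Nat.toDigits 10 (recursion on the value, digits appended at the back)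
def TD10 (n : Nat) : List Char :=
  if n < 10 then [Nat.digitChar n] else TD10 (n / 10) ++ [Nat.digitChar (n % 10)]
termination_by n
decreasing_by exact Nat.div_lt_self (by omega) (by omega)

theorem toDigitsCore_eq_TD10 (f : Nat) : ∀ (n : Nat) (acc : List Char), n < f →
    Nat.toDigitsCore 10 f n acc = TD10 n ++ acc := by
  induction f with
  | zero => omega
  | succ f ih =>
    intro n acc h
    rw [Nat.toDigitsCore]
    by_cases h10 : n < 10
    · have hz : n / 10 = 0 := Nat.div_eq_of_lt h10
      rw [TD10]
      simp [hz, h10, Nat.mod_eq_of_lt h10]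
    · have hne : ¬ n / 10 = 0 := by omega
      simp only [hne, if_false]
      rw [ih (n / 10) _ (by omega)]
      conv_rhs => rw [TD10, if_neg h10]
      simp

theorem toDigits_eq_TD10 (n : Nat) : Nat.toDigits 10 n = TD10 n := by
  show Nat.toDigitsCore 10 (n + 1) n [] = TD10 n
  rw [toDigitsCore_eq_TD10 (n + 1) n [] (Nat.lt_succ_self n)]
  simp

theorem toChars_eq (N : Int) :
    PySem.Int.toChars N = if N < 0 then '-' :: TD10 N.natAbs else TD10 N.toNat := by
  unfold PySem.Int.toChars
  split <;> rw [toDigits_eq_TD10]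

theorem digitChar_toNat (k : Nat) (h : k < 10) : (Nat.digitChar k).toNat = 48 + k := by
  interval_cases k <;> decide

theorem digitChar_ne_zero (k : Nat) (h0 : k ≠ 0) (h : k < 10) : Nat.digitChar k ≠ '0' := by
  interval_cases k <;> simp_all <;> decide

theorem digitChar_ne_dash (k : Nat) (h : k < 10) : Nat.digitChar k ≠ '-' := by
  interval_cases k <;> decide

theorem TD10_ne_nil (n : Nat) : TD10 n ≠ [] := by
  rw [TD10]; split <;> simp

theorem TD10_getLast? (n : Nat) : (TD10 n).getLast? = some (Nat.digitChar (n % 10)) := by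
  rw [TD10]
  split
  · rename_i h; simp [Nat.mod_eq_of_lt h]
  · simp

theorem TD10_mem (n : Nat) : ∀ c ∈ TD10 n, ∃ k, k < 10 ∧ c = Nat.digitChar k := by
  induction n using TD10.induct with
  | case1 n h =>
    rw [TD10, if_pos h]
    intro c hc
    simp at hc
    exact ⟨n, h, hc⟩
  | case2 n h ih =>
    rw [TD10, if_neg h]
    intro c hc
    rcases List.mem_append.mp hc with hl | hr
    · exact ih c hl
    · simp at hr
      exact ⟨n % 10, Nat.mod_lt _ (by omega), hr⟩

theorem decVal_append (xs : List Char) (c : Char) :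
    decVal (xs ++ [c]) = 10 * decVal xs + ((c.toNat : Int) - 48) := by
  simp [decVal, List.foldl_append]

theorem decVal_TD10 (n : Nat) : decVal (TD10 n) = n := by
  induction n using TD10.induct with
  | case1 n h =>
    rw [TD10, if_pos h]
    simp [decVal, digitChar_toNat n h]
  | case2 n h ih =>
    rw [TD10, if_neg h, decVal_append, ih, digitChar_toNat _ (Nat.mod_lt _ (by omega))]
    push_cast
    omega

theorem TD10_head_ne_dash (n : Nat) : (TD10 n).head? ≠ some '-' := by
  intro hc
  obtain ⟨a, t, h⟩ : ∃ a t, TD10 n = a :: t := by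
    cases h' : TD10 n with
    | nil => exact absurd h' (TD10_ne_nil n)
    | cons a t => exact ⟨a, t, rfl⟩
  rw [h] at hc
  simp at hc
  have hm : '-' ∈ TD10 n := by rw [h, hc]; exact List.mem_cons_self
  obtain ⟨k, hk, he⟩ := TD10_mem n '-' hm
  exact digitChar_ne_dash k hk he.symm

-- int(str(M) with trailing zeros removed) — only the unstripped form is needed: roundtrip on toChars
theorem pyIntCanon_toChars (M : Int) : pyIntCanon (PySem.Int.toChars M) = M := by
  rw [toChars_eq]
  by_cases h : M < 0
  · rw [if_pos h]
    unfold pyIntCanon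
    rw [if_pos (by simp), List.tail_cons, decVal_TD10]
    omega
  · rw [if_neg h]
    unfold pyIntCanon
    rw [if_neg (TD10_head_ne_dash M.toNat), decVal_TD10]
    omega

theorem toChars_ne_nil (N : Int) : PySem.Int.toChars N ≠ [] := by
  rw [toChars_eq]
  split
  · simp
  · exact TD10_ne_nil _

-- one iteration of A's loop: a trailing '0' after a nonempty prefix is peeled
theorem reduce0Loop_peel (s : List Char) (h : s ≠ []) :
    reduce0Loop (s ++ ['0']) = reduce0Loop s := by
  rw [reduce0Loop]
  have hlen : 1 < (s ++ ['0']).length := by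
    cases s with
    | nil => exact absurd rfl h
    | cons a t => simp
  rw [if_pos hlen, if_pos (by rw [PySem.List.pyGet?_neg_one_append_singleton]),
    PySem.List.slice_to_neg_one, List.dropLast_concat]

-- A's loop exits on a single-character string
theorem reduce0Loop_stop_len (s : List Char) (h : s.length ≤ 1) : reduce0Loop s = s := by
  rw [reduce0Loop, if_neg (by omega)]

-- A's loop exits when the last character is not '0'
theorem reduce0Loop_stop (s : List Char) (h : s.getLast? ≠ some '0') : reduce0Loop s = s := by
  rw [reduce0Loop]
  split
  · rw [if_neg (by rw [PySem.List.pyGet?_neg_one]; exact h)]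
  · rfl

-- the decimal string of N with 10 ∣ N, N ≠ 0 is the decimal string of N // 10 plus a final '0'
theorem toChars_peel (N : Int) (h0 : N ≠ 0) (hd : PySem.Int.mod N 10 = 0) :
    PySem.Int.toChars N = PySem.Int.toChars (PySem.Int.floordiv N 10) ++ ['0'] := by
  have hm : N % 10 = 0 := by
    have : N.fmod 10 = 0 := hd
    rwa [show N.fmod 10 = N % 10 from by simp [Int.fmod_eq_emod]] at this
  have hq : PySem.Int.floordiv N 10 = N / 10 := by
    simp [PySem.Int.floordiv, Int.fdiv_eq_ediv]
  rw [hq, toChars_eq, toChars_eq]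
  by_cases hneg : N < 0
  · have hqneg : N / 10 < 0 := by omega
    rw [if_pos hneg, if_pos hqneg]
    have hge : ¬ N.natAbs < 10 := by omega
    conv_lhs => rw [TD10, if_neg hge]
    have hdiv : N.natAbs / 10 = (N / 10).natAbs := by omega
    have hmod : N.natAbs % 10 = 0 := by omega
    rw [hdiv, hmod]
    simp [Nat.digitChar]
  · have hqpos : ¬ N / 10 < 0 := by omega
    rw [if_neg hneg, if_neg hqpos]
    have hge : ¬ N.toNat < 10 := by omega
    conv_lhs => rw [TD10, if_neg hge]
    have hdiv : N.toNat / 10 = (N / 10).toNat := by omega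
    have hmod : N.toNat % 10 = 0 := by omega
    rw [hdiv, hmod]
    simp [Nat.digitChar]

theorem getLast?_cons_ne_nil (a : Char) (l : List Char) (h : l ≠ []) :
    (a :: l).getLast? = l.getLast? := by
  cases l with
  | nil => exact absurd rfl h
  | cons b t => simp [List.getLast?_cons]

-- the last decimal digit of N with N % 10 ≠ 0 is not '0'
theorem toChars_getLast_ne (N : Int) (hd : PySem.Int.mod N 10 ≠ 0) :
    (PySem.Int.toChars N).getLast? ≠ some '0' := by
  have hm : N % 10 ≠ 0 := by
    intro hz
    exact hd (by rw [show PySem.Int.mod N 10 = N % 10 from by simp [PySem.Int.mod, Int.fmod_eq_emod]]; exact hz)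
  rw [toChars_eq]
  by_cases hneg : N < 0
  · rw [if_pos hneg]
    rw [getLast?_cons_ne_nil _ _ (TD10_ne_nil _), TD10_getLast?]
    intro hc
    have := digitChar_ne_zero (N.natAbs % 10) (by omega) (Nat.mod_lt _ (by omega))
    simp at hc
    exact this hc
  · rw [if_neg hneg, TD10_getLast?]
    intro hc
    have := digitChar_ne_zero (N.toNat % 10) (by omega) (Nat.mod_lt _ (by omega))
    simp at hc
    exact this hc

theorem reduce0_eq_alt : ∀ (n : Nat) (N : Int), N.natAbs ≤ n → reduce0 N = reduce0_alt N := by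
  intro n
  induction n with
  | zero =>
    intro N h
    have hz : N = 0 := by omega
    subst hz
    rw [reduce0_alt.eq_def]
    norm_num
    unfold reduce0
    rw [show PySem.Int.toChars 0 = ['0'] from by decide,
      reduce0Loop_stop_len _ (by simp)]
    decide
  | succ n ih =>
    intro N h
    by_cases hc : N ≠ 0 ∧ PySem.Int.mod N 10 = 0
    · rw [reduce0_alt.eq_def, dif_pos hc]
      have hstep : reduce0 N = reduce0 (PySem.Int.floordiv N 10) := by
        unfold reduce0
        rw [toChars_peel N hc.1 hc.2, reduce0Loop_peel _ (toChars_ne_nil _)]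
      rw [hstep]
      apply ih
      have h0 := hc.1
      have hm : N % 10 = 0 := by
        have : N.fmod 10 = 0 := hc.2
        rwa [show N.fmod 10 = N % 10 from by simp [Int.fmod_eq_emod]] at this
      show (PySem.Int.floordiv N 10).natAbs ≤ n
      rw [show PySem.Int.floordiv N 10 = N / 10 from by simp [PySem.Int.floordiv, Int.fdiv_eq_ediv]]
      omega
    · rw [reduce0_alt.eq_def, dif_neg hc]
      by_cases h0 : N = 0
      · subst h0
        unfold reduce0
        rw [show PySem.Int.toChars 0 = ['0'] from by decide,
          reduce0Loop_stop_len _ (by simp)]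
        decide
      · have hd : PySem.Int.mod N 10 ≠ 0 := by
          intro hmz; exact hc ⟨h0, hmz⟩
        unfold reduce0
        rw [reduce0Loop_stop _ (toChars_getLast_ne N hd), pyIntCanon_toChars]

-- ===== VERDICT (by name: the statement is the Claim_ definition above) =====
theorem reduce0_spec : Claim_equal_reduce0 := by
  intro N _
  unfold Spec_reduce0
  exact reduce0_eq_alt N.natAbs N (le_refl _)
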